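-- pv_equiv track=rewrite | github.com/Sin-Yejun/Coding-Study | Programmers/[3차] 방금그곡.py | solution
-- ===== SOURCE A (Python) =====
-- def changecode(music_):
--     music_ = music_.replace('C#', 'c')
--     music_ = music_.replace('D#', 'd')
--     music_ = music_.replace('F#', 'f')
--     music_ = music_.replace('G#', 'g')
--     music_ = music_.replace('A#', 'a')
--     return music_
--
-- def solution(m, musicinfos):
--     m = changecode(m)
--     arr = []
--     for music in musicinfos:
--         tmp = music.split(',')
--         start_time = int(tmp[0][:2])*60 + int(tmp[0][3:5])
--         finish_time = int(tmp[1][:2])*60 + int(tmp[1][3:5])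
--         time = finish_time - start_time
--         tmp[3] = changecode(tmp[3])
--         arr.append([time, tmp[2], tmp[3]])
--     arr.sort(key = lambda x:-x[0])
--
--
--     for time, name, info in arr:
--         temp = ''
--         cnt = 0
--         for j in range(time):
--             temp += info[cnt]
--             cnt += 1
--             if cnt == len(info):
--                 cnt = 0
--         if m in temp:
--             return name
--
--     return "(None)"
-- ===== SOURCE B (Python) =====
-- def changecode(music_):
--     music_ = music_.replace('C#', 'c')
--     music_ = music_.replace('D#', 'd')
--     music_ = music_.replace('F#', 'f')
--     music_ = music_.replace('G#', 'g')
--     music_ = music_.replace('A#', 'a')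
--     return music_
--
-- def _parse(music):
--     tmp = music.split(',')
--     start = int(tmp[0][:2]) * 60 + int(tmp[0][3:5])
--     finish = int(tmp[1][:2]) * 60 + int(tmp[1][3:5])
--     return finish - start, tmp[2], changecode(tmp[3])
--
-- def solution(m, musicinfos):
--     m = changecode(m)
--     best = None
--     for music in musicinfos:
--         time, name, info = _parse(music)
--         played = '' if time <= 0 else (info * (time // len(info) + 1))[:time]
--         if m in played and (best is None or best[0] < time):
--             best = (time, name)
--     return "(None)" if best is None else best[1]
-- ===== Notes on version B (the rewrite author's own statement) =====
-- stated objective: alternative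
-- what changed: Replaces A's build-list / stable-sort-by-descending-time / first-substring-match pipeline with a single pass that keeps the best (longest, earliest on ties) matching song via a strict '>' comparison, and builds the played melody by string repetition plus slicing instead of A's character-by-character cyclic loop.
-- outside the precondition, e.g. on solution('A', ['00:00,00:01,x,A', '00:00,00:01,y,']): A returns 'x', B raises ZeroDivisionError
import Mathlib
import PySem

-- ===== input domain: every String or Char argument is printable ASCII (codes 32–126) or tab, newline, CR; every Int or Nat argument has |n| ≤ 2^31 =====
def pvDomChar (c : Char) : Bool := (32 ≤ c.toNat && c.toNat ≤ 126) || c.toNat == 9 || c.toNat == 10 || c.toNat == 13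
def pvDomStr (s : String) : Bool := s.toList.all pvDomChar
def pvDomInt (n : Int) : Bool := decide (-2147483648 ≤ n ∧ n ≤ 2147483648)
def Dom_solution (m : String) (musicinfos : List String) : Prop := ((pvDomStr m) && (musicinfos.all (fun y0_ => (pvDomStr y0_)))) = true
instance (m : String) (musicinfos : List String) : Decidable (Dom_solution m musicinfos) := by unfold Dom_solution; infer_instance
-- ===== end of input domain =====

-- B replaces A's build/stable-sort-descending/first-match pipeline by a single best-so-far pass
-- (strict '>' keeps the earliest among equal longest matches) and builds the played melody by
-- repetition + slicing instead of A's character-by-character cyclic loop; equal return values on Pre_.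

-- ===== PORT A =====
def changecode (s : String) : String :=
  PySem.Str.replace (PySem.Str.replace (PySem.Str.replace (PySem.Str.replace
    (PySem.Str.replace s "C#" "c") "D#" "d") "F#" "f") "G#" "g") "A#" "a"

-- A's inner character loop: temp = '' ; cnt = 0 ; for j in range(time): temp += info[cnt] …
def tempLoop (info : List Char) (time : Int) : List Char :=
  ((PySem.List.pyRange 0 time 1).foldl
    (fun (st : List Char × Int) _ =>
      let c := (PySem.List.pyGet? info st.2).getD ' '
      let cnt := st.2 + 1
      (st.1 ++ [c], if cnt = (info.length : Int) then 0 else cnt))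
    ([], 0)).1

-- A's second loop with its early return
def findFirst (m : List Char) : List (Int × String × String) → String
  | [] => "(None)"
  | (time, name, info) :: rest =>
      if PySem.Chars.isIn m (tempLoop info.toList time) then name else findFirst m rest

def solution (m : String) (musicinfos : List String) : String :=
  let mc := changecode m
  let arr := musicinfos.foldl
    (fun (arr : List (Int × String × String)) music =>
      let tmp := (PySem.Str.split? music ",").getD []
      let t0 := (PySem.List.pyGet? tmp 0).getD ""
      let t1 := (PySem.List.pyGet? tmp 1).getD ""
      let startTime := (PySem.Int.ofStr? (PySem.Str.slice t0 none (some 2))).getD 0 * 60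
                     + (PySem.Int.ofStr? (PySem.Str.slice t0 (some 3) (some 5))).getD 0
      let finishTime := (PySem.Int.ofStr? (PySem.Str.slice t1 none (some 2))).getD 0 * 60
                      + (PySem.Int.ofStr? (PySem.Str.slice t1 (some 3) (some 5))).getD 0
      let time := finishTime - startTime
      let info := changecode ((PySem.List.pyGet? tmp 3).getD "")
      arr ++ [(time, (PySem.List.pyGet? tmp 2).getD "", info)])
    []
  findFirst mc.toList (PySem.List.sorted arr (fun x => -x.1) false)

-- ===== PORT B =====
-- Source B's _parse helper
def parseMusic (music : String) : Int × String × String :=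
  let tmp := (PySem.Str.split? music ",").getD []
  let t0 := (PySem.List.pyGet? tmp 0).getD ""
  let t1 := (PySem.List.pyGet? tmp 1).getD ""
  let start := (PySem.Int.ofStr? (PySem.Str.slice t0 none (some 2))).getD 0 * 60
             + (PySem.Int.ofStr? (PySem.Str.slice t0 (some 3) (some 5))).getD 0
  let finish := (PySem.Int.ofStr? (PySem.Str.slice t1 none (some 2))).getD 0 * 60
              + (PySem.Int.ofStr? (PySem.Str.slice t1 (some 3) (some 5))).getD 0
  (finish - start, (PySem.List.pyGet? tmp 2).getD "", changecode ((PySem.List.pyGet? tmp 3).getD ""))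

-- Source B's: '' if time <= 0 else (info * (time // len(info) + 1))[:time]
def playedOf (time : Int) (info : List Char) : List Char :=
  if time ≤ 0 then []
  else PySem.List.slice
        (PySem.List.pyRepeat info (PySem.Int.floordiv time (info.length : Int) + 1))
        none (some time)

def solution_alt (m : String) (musicinfos : List String) : String :=
  let mc := (changecode m).toList
  match musicinfos.foldl
    (fun (best : Option (Int × String)) music =>
      match parseMusic music with
      | (time, name, info) =>
        if PySem.Chars.isIn mc (playedOf time info.toList)
             && (match best with | none => true | some b => decide (b.1 < time))
        then some (time, name) else best)
    none with
  | none => "(None)"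
  | some b => b.2

-- ===== PRECONDITION & SPEC =====
-- Pre_ excludes inputs where A raises: an entry with fewer than 4 comma-fields (IndexError), a
-- time field that does not parse as int (ValueError), or positive playing time with an empty
-- converted melody (IndexError in A's character loop; B raises ZeroDivisionError there).  The
-- last conjunct is checked for EVERY entry, so Pre_ is slightly narrower than A's exact domain:
-- A may return early from its sorted scan before reaching such an empty-melody entry.
def Pre_solution (m : String) (musicinfos : List String) : Prop :=
  ∀ music ∈ musicinfos,
    let tmp := (PySem.Str.split? music ",").getD []
    let t0 := (PySem.List.pyGet? tmp 0).getD ""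
    let t1 := (PySem.List.pyGet? tmp 1).getD ""
    let s1 := PySem.Int.ofStr? (PySem.Str.slice t0 none (some 2))
    let s2 := PySem.Int.ofStr? (PySem.Str.slice t0 (some 3) (some 5))
    let f1 := PySem.Int.ofStr? (PySem.Str.slice t1 none (some 2))
    let f2 := PySem.Int.ofStr? (PySem.Str.slice t1 (some 3) (some 5))
    3 < tmp.length ∧ s1.isSome ∧ s2.isSome ∧ f1.isSome ∧ f2.isSome ∧
    ((f1.getD 0 * 60 + f2.getD 0) - (s1.getD 0 * 60 + s2.getD 0) ≤ 0
      ∨ changecode ((PySem.List.pyGet? tmp 3).getD "") ≠ "")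

instance (m : String) (musicinfos : List String) : Decidable (Pre_solution m musicinfos) := by
  unfold Pre_solution; infer_instance

def pvWitness_solution : String × List String :=
  ("ABC", ["12:00,12:03,HELLO,C#DEF", "10:00,09:00,X,"])

def Spec_solution (m : String) (musicinfos : List String) (out : String) : Prop := out = solution_alt m musicinfos
instance (m : String) (musicinfos : List String) (out : String) : Decidable (Spec_solution m musicinfos out) := by unfold Spec_solution; infer_instance

-- ===== CLAIM (what is proved, stated in full; the proofs are below) =====
def Claim_equal_solution : Prop := ∀ (m : String) (musicinfos : List String), Dom_solution m musicinfos → Pre_solution m musicinfos → Spec_solution m musicinfos (solution m musicinfos)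

-- ===== LEMMAS AND PROOFS =====

-- proof-side abbreviations
def stepP (mc : List Char) (best : Option (Int × String)) (e : Int × String × String) :
    Option (Int × String) :=
  if PySem.Chars.isIn mc (tempLoop e.2.2.toList e.1)
       && (match best with | none => true | some b => decide (b.1 < e.1))
  then some (e.1, e.2.1) else best

def FM (mc : List Char) : List (Int × String × String) → Option (Int × String)
  | [] => none
  | e :: rest => if PySem.Chars.isIn mc (tempLoop e.2.2.toList e.1) then some (e.1, e.2.1) else FM mc rest

def pvBef (a b : Int × String × String) : Bool := decide ((-a.1 : Int) < -b.1)

def TimeSorted (s : List (Int × String × String)) : Prop :=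
  s.Pairwise (fun a b => b.1 ≤ a.1)

lemma pyRange01_eq (time : Int) :
    PySem.List.pyRange 0 time 1 = (List.range time.toNat).map (fun k => (k : Int)) := by
  unfold PySem.List.pyRange
  norm_num
  rcases lt_or_ge 0 time with h | h
  · simp only [h, if_pos]; exact List.map_eq_flatMap
  · simp [not_lt.mpr h, Int.toNat_of_nonpos h]

lemma tempLoop_nonpos (info : List Char) (time : Int) (h : time ≤ 0) :
    tempLoop info time = [] := by
  unfold tempLoop
  rw [pyRange01_eq, Int.toNat_of_nonpos h]
  rfl

lemma loop_spec (info : List Char) (hinfo : info ≠ []) :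
    ∀ (l : List Int) (acc : List Char) (cnt : Nat), cnt < info.length →
    (l.foldl
      (fun (st : List Char × Int) _ =>
        let c := (PySem.List.pyGet? info st.2).getD ' '
        let cnt := st.2 + 1
        (st.1 ++ [c], if cnt = (info.length : Int) then 0 else cnt))
      (acc, (cnt : Int)))
    = (acc ++ (List.range l.length).map (fun i => info.getD ((cnt + i) % info.length) ' '),
       (((cnt + l.length) % info.length : Nat) : Int)) := by
  intro l
  induction l with
  | nil => intro acc cnt hcnt; simp [Nat.mod_eq_of_lt hcnt]
  | cons x rest ih =>
    intro acc cnt hcnt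
    have hlen : 0 < info.length := List.length_pos_iff.mpr hinfo
    simp only [List.foldl_cons]
    have hc : (PySem.List.pyGet? info (cnt : Int)).getD ' ' = info.getD cnt ' ' := by
      rw [PySem.List.pyGet?_natCast, List.getD_eq_getElem?_getD]
    have hnext : (if (cnt : Int) + 1 = (info.length : Int) then (0 : Int) else (cnt : Int) + 1)
        = (((cnt + 1) % info.length : Nat) : Int) := by
      by_cases he : cnt + 1 = info.length
      · have hce : (cnt : Int) + 1 = (info.length : Int) := by exact_mod_cast he
        rw [if_pos hce, he, Nat.mod_self]
        simp
      · have h1 : cnt + 1 < info.length := by omega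
        rw [if_neg (by exact_mod_cast he), Nat.mod_eq_of_lt h1]
        push_cast; ring
    rw [hc, hnext, ih _ _ (Nat.mod_lt _ hlen)]
    simp only [Prod.mk.injEq]
    constructor
    · rw [List.append_assoc]
      congr 1
      rw [List.length_cons, List.range_succ_eq_map]
      simp only [List.map_cons, List.map_map, List.cons_append, List.nil_append]
      congr 1
      · rw [Nat.add_zero, Nat.mod_eq_of_lt hcnt]
      · apply List.map_congr_left
        intro a _
        simp only [Function.comp_apply]
        rw [Nat.mod_add_mod]
        congr 2
        omega
    · simp only [List.length_cons]
      rw [Nat.mod_add_mod]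
      congr 2
      omega

lemma tempLoop_pos (info : List Char) (time : Int) (hinfo : info ≠ []) :
    tempLoop info time
      = (List.range time.toNat).map (fun i => info.getD (i % info.length) ' ') := by
  have hlen : 0 < info.length := List.length_pos_iff.mpr hinfo
  unfold tempLoop
  rw [pyRange01_eq]
  have h := loop_spec info hinfo ((List.range time.toNat).map (fun k => (k : Int))) [] 0 hlen
  simpa using congrArg Prod.fst h

lemma flatten_replicate_length (K : Nat) (info : List Char) :
    ((List.replicate K info).flatten).length = K * info.length := by
  simp [List.length_flatten, List.map_replicate, List.sum_replicate, smul_eq_mul]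

lemma flatten_replicate_getD (info : List Char) (hinfo : info ≠ []) :
    ∀ (K i : Nat), i < K * info.length →
    ((List.replicate K info).flatten).getD i ' ' = info.getD (i % info.length) ' ' := by
  have hlen : 0 < info.length := List.length_pos_iff.mpr hinfo
  intro K
  induction K with
  | zero => intro i h; omega
  | succ K ih =>
    intro i h
    rw [Nat.succ_mul] at h
    rw [List.replicate_succ, List.flatten_cons]
    by_cases hi : i < info.length
    · rw [List.getD_append _ _ _ _ (by omega), Nat.mod_eq_of_lt hi]
    · have hmod : i % info.length = (i - info.length) % info.length := by
        conv_lhs => rw [show i = i - info.length + info.length by omega]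
        rw [Nat.add_mod_right]
      rw [List.getD_append_right _ _ _ _ (by omega), ih (i - info.length) (by omega), hmod]

lemma played_eq (time : Int) (info : List Char) (hinfo : info ≠ []) (ht : 0 < time) :
    playedOf time info
      = (List.range time.toNat).map (fun i => info.getD (i % info.length) ' ') := by
  have hlen : 0 < info.length := List.length_pos_iff.mpr hinfo
  have hlen' : (0 : Int) < (info.length : Int) := by exact_mod_cast hlen
  unfold playedOf
  rw [if_neg (by omega)]
  unfold PySem.List.pyRepeat
  rw [PySem.List.slice_to (xs := (List.replicate (PySem.Int.floordiv time (info.length : Int) + 1).toNat info).flatten) (b := time) (by omega)]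
  have hK : time.toNat ≤ (PySem.Int.floordiv time (info.length : Int) + 1).toNat * info.length := by
    rw [PySem.Int.floordiv_eq_ediv_of_pos hlen']
    have h1 : time < (time / (info.length : Int) + 1) * (info.length : Int) :=
      Int.lt_ediv_add_one_mul_self time hlen'
    have hq : 0 ≤ time / (info.length : Int) := Int.ediv_nonneg (by omega) (by omega)
    have hm := Int.toNat_mul (a := time / (info.length : Int) + 1) (b := (info.length : Int))
      (by omega) (by omega)
    have h2 : time.toNat ≤ ((time / (info.length : Int) + 1) * (info.length : Int)).toNat :=
      Int.toNat_le_toNat h1.le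
    rwa [hm, Int.toNat_natCast] at h2
  apply List.ext_getElem
  · simp only [List.length_take, flatten_replicate_length, List.length_map, List.length_range]
    omega
  · intro i h1 h2
    have hi : i < time.toNat := by simpa using h2
    have hif : i < ((List.replicate (PySem.Int.floordiv time (info.length : Int) + 1).toNat info).flatten).length := by
      rw [flatten_replicate_length]; omega
    rw [List.getElem_take, List.getElem_map, List.getElem_range,
        ← List.getD_eq_getElem _ ' ' hif,
        flatten_replicate_getD info hinfo _ i (by rw [flatten_replicate_length] at hif; exact hif)]

lemma findFirst_eq_FM (mc : List Char) (l : List (Int × String × String)) :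
    findFirst mc l = match FM mc l with | none => "(None)" | some b => b.2 := by
  induction l with
  | nil => rfl
  | cons e rest ih =>
    obtain ⟨t, n, i⟩ := e
    simp only [findFirst, FM]
    split <;> simp [ih]

lemma FM_time_mem (mc : List Char) (l : List (Int × String × String)) (b : Int × String)
    (h : FM mc l = some b) : ∃ z ∈ l, b.1 = z.1 := by
  induction l with
  | nil => simp [FM] at h
  | cons e rest ih =>
    simp only [FM] at h
    split at h
    · exact ⟨e, by simp, by cases h; rfl⟩
    · obtain ⟨z, hz, hb⟩ := ih h
      exact ⟨z, by simp [hz], hb⟩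

lemma insertBy_timeSorted (x : Int × String × String) (s : List (Int × String × String))
    (hs : TimeSorted s) : TimeSorted (PySem.List.insertBy pvBef x s) := by
  induction s with
  | nil => simp [PySem.List.insertBy, TimeSorted]
  | cons y ys ih =>
    rw [TimeSorted, List.pairwise_cons] at hs
    obtain ⟨hy, hys⟩ := hs
    by_cases hb : pvBef x y = true
    · have hxy : y.1 < x.1 := by simpa [pvBef] using hb
      simp only [PySem.List.insertBy, hb, if_pos]
      refine List.Pairwise.cons ?_ (List.Pairwise.cons hy hys)
      intro z hz
      rcases List.mem_cons.mp hz with rfl | hz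
      · omega
      · have := hy z hz; omega
    · simp only [PySem.List.insertBy, hb, if_neg, Bool.false_eq_true, not_false_iff]
      refine List.Pairwise.cons ?_ (ih hys)
      intro z hz
      rw [PySem.List.mem_insertBy] at hz
      rcases hz with rfl | hz
      · have : ¬ (y.1 < z.1) := by simpa [pvBef] using hb
        omega
      · exact hy z hz

lemma FM_insertBy (mc : List Char) (x : Int × String × String)
    (s : List (Int × String × String)) (hs : TimeSorted s) :
    FM mc (PySem.List.insertBy pvBef x s) = stepP mc (FM mc s) x := by
  induction s with
  | nil =>
    simp only [PySem.List.insertBy, FM, stepP]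
    cases hP : PySem.Chars.isIn mc (tempLoop x.2.2.toList x.1) <;> simp_all
  | cons y ys ih =>
    rw [TimeSorted, List.pairwise_cons] at hs
    obtain ⟨hy, hys⟩ := hs
    by_cases hb : pvBef x y = true
    · have hxy : y.1 < x.1 := by simpa [pvBef] using hb
      simp only [PySem.List.insertBy, hb, if_pos]
      have hstep : FM mc (x :: y :: ys)
          = if PySem.Chars.isIn mc (tempLoop x.2.2.toList x.1) then some (x.1, x.2.1)
            else FM mc (y :: ys) := rfl
      rw [hstep]
      cases hP : PySem.Chars.isIn mc (tempLoop x.2.2.toList x.1)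
      · simp [stepP, hP]
      · cases hFM : FM mc (y :: ys) with
        | none => simp [stepP, hP]
        | some b =>
          have hble : b.1 ≤ y.1 := by
            obtain ⟨z, hz, hbz⟩ := FM_time_mem mc (y :: ys) b hFM
            rcases List.mem_cons.mp hz with rfl | hz
            · omega
            · have := hy z hz; omega
          simp [stepP, hP, show b.1 < x.1 by omega]
    · have hxy : x.1 ≤ y.1 := by
        have : ¬ (y.1 < x.1) := by simpa [pvBef] using hb
        omega
      simp only [PySem.List.insertBy, hb, if_neg, Bool.false_eq_true, not_false_iff]
      have hstep : FM mc (y :: PySem.List.insertBy pvBef x ys)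
          = if PySem.Chars.isIn mc (tempLoop y.2.2.toList y.1) then some (y.1, y.2.1)
            else FM mc (PySem.List.insertBy pvBef x ys) := rfl
      have hstep' : FM mc (y :: ys)
          = if PySem.Chars.isIn mc (tempLoop y.2.2.toList y.1) then some (y.1, y.2.1)
            else FM mc ys := rfl
      rw [hstep, hstep']
      cases hPy : PySem.Chars.isIn mc (tempLoop y.2.2.toList y.1)
      · simpa [stepP, hPy] using ih hys
      · simp [stepP, show ¬ (y.1 < x.1) by omega]

lemma FM_foldl_insertBy (mc : List Char) (l : List (Int × String × String)) :
    ∀ (s : List (Int × String × String)), TimeSorted s →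
    FM mc (l.foldl (fun acc x => PySem.List.insertBy pvBef x acc) s)
      = l.foldl (stepP mc) (FM mc s) := by
  induction l with
  | nil => intro s _; rfl
  | cons x rest ih =>
    intro s hs
    simp only [List.foldl_cons]
    rw [ih _ (insertBy_timeSorted x s hs), FM_insertBy mc x s hs]

lemma playedOf_eq_tempLoop (time : Int) (info : List Char)
    (h : time ≤ 0 ∨ info ≠ []) : playedOf time info = tempLoop info time := by
  by_cases ht : time ≤ 0
  · rw [tempLoop_nonpos info time ht]
    unfold playedOf
    rw [if_pos ht]
  · have hinfo : info ≠ [] := by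
      rcases h with h | h
      · exact absurd h ht
      · exact h
    rw [played_eq time info hinfo (by omega), tempLoop_pos info time hinfo]

theorem solution_spec : Claim_equal_solution := by
  intro m ms hdom hpre
  unfold Spec_solution
  have hA : solution m ms
      = findFirst (changecode m).toList
          (PySem.List.sorted (ms.foldl (fun arr music => arr ++ [parseMusic music]) [])
            (fun x => -x.1) false) := rfl
  have hB : solution_alt m ms
      = (match ms.foldl (fun (best : Option (Int × String)) music =>
            if PySem.Chars.isIn (changecode m).toList
                 (playedOf (parseMusic music).1 (parseMusic music).2.2.toList)
                 && (match best with | none => true | some b => decide (b.1 < (parseMusic music).1))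
            then some ((parseMusic music).1, (parseMusic music).2.1) else best) none with
         | none => "(None)" | some b => b.2) := rfl
  rw [hA, hB]
  rw [PySem.List.foldl_append_singleton_eq_map, List.nil_append]
  have hcong : ms.foldl (fun (best : Option (Int × String)) music =>
            if PySem.Chars.isIn (changecode m).toList
                 (playedOf (parseMusic music).1 (parseMusic music).2.2.toList)
                 && (match best with | none => true | some b => decide (b.1 < (parseMusic music).1))
            then some ((parseMusic music).1, (parseMusic music).2.1) else best) none
      = ms.foldl (fun best music => stepP (changecode m).toList best (parseMusic music)) none := by
    apply PySem.List.foldl_congr_mem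
    intro acc music hmem
    obtain ⟨-, -, -, -, -, hlast⟩ := hpre music hmem
    have hpt : playedOf (parseMusic music).1 (parseMusic music).2.2.toList
        = tempLoop (parseMusic music).2.2.toList (parseMusic music).1 := by
      apply playedOf_eq_tempLoop
      rcases hlast with h | h
      · left; exact h
      · right; intro hc; exact h (String.toList_eq_nil_iff.mp hc)
    rw [hpt]
    rfl
  rw [hcong, ← List.foldl_map (f := parseMusic) (g := stepP (changecode m).toList)]
  rw [PySem.List.sorted_eq_foldl_insertBy]
  rw [findFirst_eq_FM]
  rw [show (fun (a b : Int × String × String) =>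
        decide ((fun x : Int × String × String => -x.1) a < (fun x : Int × String × String => -x.1) b))
      = pvBef from rfl]
  rw [FM_foldl_insertBy (changecode m).toList _ [] List.Pairwise.nil]
  rfl
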